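-- pv_equiv track=rewrite | github.com/limkeunhyeok/algorithm-study | keunhak/nhn/prob3.py | getMinCnt
-- ===== SOURCE A (Python) =====
-- import copy
--
-- def getMinCnt(goodsList, cnt):
--     if len(goodsList) == 0: return cnt
--
--     optIndex = getOptimalIndex(goodsList)
--
--     listCopy = copy.deepcopy(goodsList)
--     for weight in range(goodsList[optIndex], goodsList[optIndex] + 5):
--         if weight in listCopy:
--             listCopy.remove(weight)
--
--     # 꼬리 재귀 (입력 크기가 작아 최대 스택의 길이가 20 depth 라서 필요 없을 수 있음)
--     return getMinCnt(listCopy, cnt + 1)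
--
-- def getOptimalIndex(goodsList):
--     max = -1
--     ret = 0
--
--     for i in range(len(goodsList)):
--         cnt = 0
--         for w in range(0, 5):
--             if goodsList[i] + w in goodsList:
--                 cnt += 1
--         if cnt > max:
--             max = cnt
--             ret = i
--
--     return ret
-- ===== SOURCE B (Python) =====
-- def getMinCnt(goodsList, cnt):
--     # Iterative greedy: repeatedly pick the start value whose window [v, v+5)
--     # covers the most distinct present weights (first-wins tie-break), then
--     # drop one occurrence of each window value in a single rebuild pass.
--     work = list(goodsList)
--     while work:
--         present = set(work)
--         start = max(work, key=lambda v: sum(1 for x in present if v <= x < v + 5))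
--         window = set(range(start, start + 5))
--         kept = []
--         for x in work:
--             if x in window:
--                 window.discard(x)
--             else:
--                 kept.append(x)
--         work = kept
--         cnt += 1
--     return cnt
-- ===== Notes on version B (the rewrite author's own statement) =====
-- stated objective: alternative
-- what changed: Tail recursion with per-step deepcopy and repeated list.remove/list-membership scans is replaced by an explicit while-loop that picks the best window start with max() over a set of present weights and removes one occurrence of each window value in a single rebuild pass.
import Mathlib
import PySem

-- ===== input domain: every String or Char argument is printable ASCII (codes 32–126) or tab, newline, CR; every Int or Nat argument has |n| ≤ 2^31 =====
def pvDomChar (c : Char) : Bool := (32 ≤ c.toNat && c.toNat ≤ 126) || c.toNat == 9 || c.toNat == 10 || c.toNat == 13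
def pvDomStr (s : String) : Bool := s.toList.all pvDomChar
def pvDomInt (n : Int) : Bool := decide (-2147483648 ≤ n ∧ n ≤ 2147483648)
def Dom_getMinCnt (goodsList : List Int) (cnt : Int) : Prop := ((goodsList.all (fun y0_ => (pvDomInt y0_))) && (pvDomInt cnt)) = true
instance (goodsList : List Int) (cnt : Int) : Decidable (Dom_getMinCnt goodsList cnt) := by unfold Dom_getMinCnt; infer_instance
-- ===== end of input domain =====

-- B replaces A's tail recursion + repeated list.remove/list-membership scans by an explicit
-- while-loop using sets and a single rebuild pass per group (objective: alternative).

-- ===== PORT A =====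
-- inner loop of getOptimalIndex: for w in range(0,5): if goodsList[i]+w in goodsList: cnt += 1
def pyCov (g : List Int) (v : Int) : Int :=
  (PySem.List.pyRange 0 5 1).foldl (fun c w => if g.contains (v + w) then c + 1 else c) 0

def getOptimalIndex (g : List Int) : Int :=
  ((PySem.List.pyRange 0 (g.length : Int) 1).foldl
    (fun (st : Int × Int) i =>
      let c := pyCov g (PySem.List.pyGetD g i 0)
      if c > st.1 then (c, i) else st) (-1, 0)).2

-- for weight in range(g[opt], g[opt]+5): if weight in listCopy: listCopy.remove(weight)
def removePass (ws : List Int) (l : List Int) : List Int :=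
  ws.foldl (fun l w => if l.contains w then (PySem.List.remove? l w).getD l else l) l

-- (termination helpers for the port, cited by decreasing_by)
theorem removePass_eq_foldl_erase (ws l : List Int) :
    removePass ws l = ws.foldl (fun l w => l.erase w) l := by
  unfold removePass
  congr 1
  funext l w
  by_cases hw : w ∈ l
  · simp [hw, PySem.List.remove?_eq_some_erase l w hw]
  · simp [hw, List.erase_of_not_mem hw]

theorem length_foldl_erase_le (ws l : List Int) :
    (ws.foldl (fun l w => l.erase w) l).length ≤ l.length := by
  induction ws generalizing l with
  | nil => simp
  | cons w ws ih =>
    simp only [List.foldl_cons]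
    exact le_trans (ih (l.erase w)) List.length_erase_le

theorem foldl_sel_snd (g : List Int) (l : List Int) (st : Int × Int) :
    (l.foldl (fun (st : Int × Int) i =>
      let c := pyCov g (PySem.List.pyGetD g i 0)
      if c > st.1 then (c, i) else st) st).2 = st.2 ∨
    (l.foldl (fun (st : Int × Int) i =>
      let c := pyCov g (PySem.List.pyGetD g i 0)
      if c > st.1 then (c, i) else st) st).2 ∈ l := by
  induction l generalizing st with
  | nil => simp
  | cons i l ih =>
    simp only [List.foldl_cons, List.mem_cons]
    rcases ih (if pyCov g (PySem.List.pyGetD g i 0) > st.1 then (pyCov g (PySem.List.pyGetD g i 0), i) else st) with h1 | h1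
    · rw [h1]
      split
      · exact Or.inr (Or.inl rfl)
      · exact Or.inl rfl
    · exact Or.inr (Or.inr h1)

theorem getOptimalIndex_bounds (g : List Int) (h : g ≠ []) :
    0 ≤ getOptimalIndex g ∧ getOptimalIndex g < (g.length : Int) := by
  have hlen : 0 < g.length := List.length_pos_iff.mpr h
  unfold getOptimalIndex
  rcases foldl_sel_snd g (PySem.List.pyRange 0 (g.length : Int) 1) (-1, 0) with h1 | h1
  · rw [h1]
    refine ⟨by norm_num, ?_⟩
    show (0 : Int) < (g.length : Int)
    exact_mod_cast hlen
  · rw [PySem.List.mem_pyRange_one] at h1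
    exact h1

theorem opt_mem (g : List Int) (h : g ≠ []) :
    PySem.List.pyGetD g (getOptimalIndex g) 0 ∈ g := by
  obtain ⟨h0, h1⟩ := getOptimalIndex_bounds g h
  rw [PySem.List.pyGetD_of_nonneg _ _ h0]
  have hlt : (getOptimalIndex g).toNat < g.length := by omega
  rw [List.getD_eq_getElem g 0 hlt]
  exact List.getElem_mem hlt

theorem removePass_decr (g : List Int) (v : Int) (hv : v ∈ g) :
    (removePass (PySem.List.pyRange v (v + 5) 1) g).length < g.length := by
  rw [removePass_eq_foldl_erase, PySem.List.pyRange_one_cons (by omega : v < v + 5)]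
  simp only [List.foldl_cons]
  have h1 := length_foldl_erase_le (PySem.List.pyRange (v + 1) (v + 5) 1) (g.erase v)
  have h2 : (g.erase v).length = g.length - 1 := List.length_erase_of_mem hv
  have h3 : 0 < g.length := List.length_pos_iff.mpr (List.ne_nil_of_mem hv)
  omega

def getMinCnt (goodsList : List Int) (cnt : Int) : Int :=
  if goodsList.length = 0 then cnt
  else
    let optIndex := getOptimalIndex goodsList
    let v := PySem.List.pyGetD goodsList optIndex 0
    let listCopy := removePass (PySem.List.pyRange v (v + 5) 1) goodsList
    getMinCnt listCopy (cnt + 1)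
termination_by goodsList.length
decreasing_by
  exact removePass_decr goodsList _ (opt_mem goodsList (by simpa [List.length_eq_zero_iff] using ‹¬goodsList.length = 0›))

-- ===== PORT B =====
-- key=lambda v: sum(1 for x in present if v <= x < v + 5)
def altKey (present : PySem.Set Int) (v : Int) : Int :=
  ((present.filter (fun x => decide (v ≤ x) && decide (x < v + 5))).length : Int)

-- the single rebuild pass: skip the first occurrence of each window value
def keepPass (window : PySem.Set Int) (xs : List Int) : List Int :=
  match xs with
  | [] => []
  | x :: t =>
    if PySem.Set.contains window x then keepPass (PySem.Set.discard window x) t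
    else x :: keepPass window t

theorem length_keepPass_le (xs : List Int) (wnd : PySem.Set Int) :
    (keepPass wnd xs).length ≤ xs.length := by
  induction xs generalizing wnd with
  | nil => simp [keepPass]
  | cons x t ih =>
    unfold keepPass
    split
    · have := ih (PySem.Set.discard wnd x); simp; omega
    · have := ih wnd; simp; omega

theorem length_keepPass_lt (xs : List Int) (wnd : PySem.Set Int)
    (h : ∃ x ∈ xs, wnd.contains x = true) : (keepPass wnd xs).length < xs.length := by
  induction xs generalizing wnd with
  | nil => simp at h
  | cons x t ih =>
    unfold keepPass
    split
    · have := length_keepPass_le t (PySem.Set.discard wnd x); simp; omega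
    · rename_i hx
      obtain ⟨y, hy, hyc⟩ := h
      rcases List.mem_cons.mp hy with rfl | hyt
      · exact absurd hyc hx
      · have := ih wnd ⟨y, hyt, hyc⟩; simp; omega

theorem alt_decr (g : List Int) (h : ¬ g = []) :
    (keepPass (PySem.Set.ofList (PySem.List.pyRange ((PySem.List.max? g (fun v => altKey (PySem.Set.ofList g) v)).getD 0)
      (((PySem.List.max? g (fun v => altKey (PySem.Set.ofList g) v)).getD 0) + 5) 1)) g).length < g.length := by
  cases hmax : PySem.List.max? g (fun v => altKey (PySem.Set.ofList g) v) with
  | none => exact absurd ((PySem.List.max?_eq_none_iff _ _).mp hmax) h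
  | some m =>
    have hm : m ∈ g := PySem.List.max?_mem hmax
    apply length_keepPass_lt
    refine ⟨m, hm, ?_⟩
    simp [PySem.Set.contains, hmax, PySem.Set.mem_ofList, PySem.List.mem_pyRange_one]

def getMinCnt_alt (goodsList : List Int) (cnt : Int) : Int :=
  if h : goodsList = [] then cnt
  else
    let present := PySem.Set.ofList goodsList
    let start := (PySem.List.max? goodsList (fun v => altKey present v)).getD 0
    let kept := keepPass (PySem.Set.ofList (PySem.List.pyRange start (start + 5) 1)) goodsList
    getMinCnt_alt kept (cnt + 1)
termination_by goodsList.length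
decreasing_by
  exact alt_decr goodsList h

-- ===== PRECONDITION & SPEC =====
def Spec_getMinCnt (goodsList : List Int) (cnt : Int) (out : Int) : Prop := out = getMinCnt_alt goodsList cnt
instance (goodsList : List Int) (cnt : Int) (out : Int) : Decidable (Spec_getMinCnt goodsList cnt out) := by unfold Spec_getMinCnt; infer_instance

-- ===== CLAIM (what is proved, stated in full; the proofs are below) =====
def Claim_equal_getMinCnt : Prop := ∀ (goodsList : List Int) (cnt : Int), Dom_getMinCnt goodsList cnt → Spec_getMinCnt goodsList cnt (getMinCnt goodsList cnt)

-- ===== LEMMAS AND PROOFS =====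

-- counting fold = filter length
theorem foldl_count_eq_filter {α : Type} (p : α → Bool) (l : List α) (c : Int) :
    l.foldl (fun c x => if p x then c + 1 else c) c = c + ((l.filter p).length : Int) := by
  induction l generalizing c with
  | nil => simp
  | cons x t ih =>
    simp only [List.foldl_cons, List.filter_cons]
    by_cases hx : p x
    · rw [if_pos hx, if_pos hx, ih]; simp only [List.length_cons]; push_cast; ring
    · rw [if_neg hx, if_neg hx, ih]

-- A's coverage, characterised over the window range
theorem pyCov_eq (g : List Int) (v : Int) :
    pyCov g v = (((PySem.List.pyRange v (v + 5) 1).filter (fun x => g.contains x)).length : Int) := by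
  unfold pyCov
  rw [foldl_count_eq_filter]
  rw [PySem.List.pyRange_one 0 5, PySem.List.pyRange_one v (v + 5)]
  have h5 : ((5 : Int) - 0).toNat = 5 := by decide
  have h5' : (v + 5 - v).toNat = 5 := by omega
  rw [h5, h5']
  simp [List.filter_map, Function.comp_def]

-- B's key equals the same characterisation
theorem altKey_eq (g : List Int) (v : Int) :
    altKey (PySem.Set.ofList g) v
      = (((PySem.List.pyRange v (v + 5) 1).filter (fun x => g.contains x)).length : Int) := by
  unfold altKey
  congr 1
  apply List.Perm.length_eq
  apply (List.perm_ext_iff_of_nodup ((PySem.Set.nodup_ofList g).filter _) ((PySem.List.nodup_pyRange_one v (v + 5)).filter _)).mpr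
  intro x
  simp [PySem.Set.mem_ofList, PySem.List.mem_pyRange_one]
  tauto

-- selection: A's first-max index scan picks the same value as B's max()
-- the key both programs optimise, in common form
def covKey (g : List Int) (v : Int) : Int :=
  (((PySem.List.pyRange v (v + 5) 1).filter (fun x => g.contains x)).length : Int)

theorem covKey_nonneg (g : List Int) (v : Int) : 0 ≤ covKey g v := Int.natCast_nonneg _

theorem max?_cons_fold (K : Int → Int) : ∀ (t : List Int) (x : Int),
    PySem.List.max? (x :: t) K = some (t.foldl (fun m y => if K m < K y then y else m) x) := by
  intro t
  induction t with
  | nil => intro x; rfl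
  | cons y t ih =>
    intro x
    have h1 : PySem.List.max? (x :: y :: t) K
        = PySem.List.max? ((if K x < K y then y else x) :: t) K := by
      unfold PySem.List.max?
      simp only [List.foldl_cons]
      split <;> rfl
    rw [h1, ih]
    simp only [List.foldl_cons]

theorem foldl_snd_enumerate (K : Int → Int) (t : List Int) (x s : Int) :
    (PySem.List.enumerate t s).foldl (fun m p => if K m < K p.2 then p.2 else m) x
      = t.foldl (fun m y => if K m < K y then y else m) x := by
  conv_rhs => rw [← PySem.List.map_snd_enumerate t s]
  rw [List.foldl_map]

theorem sel_core (g : List Int) (K : Int → Int) (l : List (Int × Int))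
    (hl : ∀ p ∈ l, PySem.List.pyGetD g p.1 0 = p.2) :
    ∀ (m r : Int), PySem.List.pyGetD g r 0 = m →
      PySem.List.pyGetD g ((l.foldl (fun (st : Int × Int) p =>
          if K p.2 > st.1 then (K p.2, p.1) else st) (K m, r)).2) 0
        = l.foldl (fun m p => if K m < K p.2 then p.2 else m) m := by
  induction l with
  | nil => intro m r hr; simpa using hr
  | cons p l ih =>
    intro m r hr
    simp only [List.foldl_cons, gt_iff_lt]
    by_cases hc : K m < K p.2
    · rw [if_pos hc, if_pos hc]
      exact ih (fun q hq => hl q (List.mem_cons_of_mem _ hq)) p.2 p.1 (hl p (List.mem_cons_self))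
    · rw [if_neg hc, if_neg hc]
      exact ih (fun q hq => hl q (List.mem_cons_of_mem _ hq)) m r hr

theorem sel_eq (g : List Int) (h : g ≠ []) :
    PySem.List.pyGetD g (getOptimalIndex g) 0
      = (PySem.List.max? g (fun v => altKey (PySem.Set.ofList g) v)).getD 0 := by
  -- both sides in terms of the common key
  have hBkey : (fun v => altKey (PySem.Set.ofList g) v) = covKey g := by
    funext v; rw [altKey_eq]; rfl
  rw [hBkey]
  obtain ⟨x, t, rfl⟩ := List.exists_cons_of_ne_nil h
  -- A's index fold as a fold over enumerate
  have hA : getOptimalIndex (x :: t)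
      = ((PySem.List.enumerate (x :: t) 0).foldl (fun (st : Int × Int) p =>
          if covKey (x :: t) p.2 > st.1 then (covKey (x :: t) p.2, p.1) else st) (-1, 0)).2 := by
    unfold getOptimalIndex
    rw [PySem.List.enumerate_eq_map_pyRange (d := 0), List.foldl_map]
    simp only [PySem.List.len_eq, pyCov_eq]
    rfl
  rw [hA, PySem.List.enumerate_cons]
  simp only [List.foldl_cons, zero_add]
  rw [if_pos (by have := covKey_nonneg (x :: t) x; omega)]
  have hx0 : PySem.List.pyGetD (x :: t) 0 0 = x := by
    rw [PySem.List.pyGetD_of_nonneg _ _ (le_refl 0)]; rfl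
  have hl : ∀ p ∈ PySem.List.enumerate t 1, PySem.List.pyGetD (x :: t) p.1 0 = p.2 := by
    intro p hp
    obtain ⟨k, hk, rfl⟩ := (PySem.List.mem_enumerate_iff _ _ _).mp hp
    rw [PySem.List.pyGetD_of_nonneg _ _ (by omega : (0:Int) ≤ 1 + k)]
    have : ((1 : Int) + k).toNat = k + 1 := by omega
    rw [this]
    simp [List.getD_eq_getElem?_getD, List.getElem?_eq_getElem hk]
  rw [sel_core (x :: t) (covKey (x :: t)) (PySem.List.enumerate t 1) hl x 0 hx0]
  -- B side
  rw [max?_cons_fold (covKey (x :: t)) t x, Option.getD_some]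
  exact foldl_snd_enumerate (covKey (x :: t)) t x 1

-- removal: the erase fold equals the one-pass rebuild
theorem foldl_erase_nil (ws : List Int) :
    ws.foldl (fun (l : List Int) w => l.erase w) [] = [] := by
  induction ws with
  | nil => rfl
  | cons w ws ih => simpa using ih

theorem foldl_erase_cons (ws : List Int) (x : Int) (t : List Int) :
    ws.foldl (fun l w => l.erase w) (x :: t)
      = if x ∈ ws then (ws.erase x).foldl (fun l w => l.erase w) t
        else x :: ws.foldl (fun l w => l.erase w) t := by
  induction ws generalizing t with
  | nil => simp
  | cons w ws ih =>
    simp only [List.foldl_cons]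
    by_cases hxw : x = w
    · subst hxw
      rw [List.erase_cons_head, if_pos (List.mem_cons_self), List.erase_cons_head]
    · rw [List.erase_cons_tail (by simpa using hxw)]
      rw [ih (t.erase w)]
      by_cases hx : x ∈ ws
      · rw [if_pos hx, if_pos (List.mem_cons_of_mem _ hx)]
        rw [List.erase_cons_tail (by simpa using (Ne.symm hxw))]
        simp only [List.foldl_cons]
      · rw [if_neg hx, if_neg (by simp [hxw, hx])]

theorem ofList_append (ws : List Int) : ∀ (acc : List Int), ws.Nodup → (∀ x ∈ ws, x ∉ acc) →
    ws.foldl PySem.Set.add acc = acc ++ ws := by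
  induction ws with
  | nil => intro acc _ _; simp
  | cons w ws ih =>
    intro acc hnd hacc
    simp only [List.foldl_cons]
    have hw : PySem.Set.add acc w = acc ++ [w] := by
      unfold PySem.Set.add
      rw [if_neg (by simpa [PySem.Set.contains] using hacc w List.mem_cons_self)]
    rw [hw, ih (acc ++ [w]) (List.Nodup.of_cons hnd) ?_, List.append_assoc]
    · rfl
    · intro x hx
      simp only [List.mem_append, List.mem_singleton]
      rintro (hxa | rfl)
      · exact hacc x (List.mem_cons_of_mem _ hx) hxa
      · exact (List.nodup_cons.mp hnd).1 hx

theorem ofList_of_nodup (ws : List Int) (hnd : ws.Nodup) : PySem.Set.ofList ws = ws := by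
  have := ofList_append ws [] hnd (by simp)
  simpa [PySem.Set.ofList, PySem.Set.empty] using this

theorem foldl_erase_eq_keepPass (l ws : List Int) (hnd : ws.Nodup) :
    ws.foldl (fun l w => l.erase w) l = keepPass ws l := by
  induction l generalizing ws with
  | nil => rw [foldl_erase_nil]; rfl
  | cons x t ih =>
    rw [foldl_erase_cons]
    by_cases hx : x ∈ ws
    · rw [if_pos hx]
      unfold keepPass
      rw [if_pos (by simpa [PySem.Set.contains] using hx)]
      have hdisc : PySem.Set.discard ws x = ws.erase x := by
        unfold PySem.Set.discard
        rw [List.Nodup.erase_eq_filter hnd]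
        apply List.filter_congr
        intro y _
        simp [bne]
      rw [hdisc]
      exact ih (ws.erase x) (hnd.erase x)
    · rw [if_neg hx]
      unfold keepPass
      rw [if_neg (by simpa [PySem.Set.contains] using hx)]
      rw [ih ws hnd]

theorem remove_eq (ws l : List Int) (hnd : ws.Nodup) :
    removePass ws l = keepPass (PySem.Set.ofList ws) l := by
  rw [removePass_eq_foldl_erase, ofList_of_nodup ws hnd]
  exact foldl_erase_eq_keepPass l ws hnd

theorem step_eq (g : List Int) (h : g ≠ []) :
    removePass (PySem.List.pyRange (PySem.List.pyGetD g (getOptimalIndex g) 0)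
        (PySem.List.pyGetD g (getOptimalIndex g) 0 + 5) 1) g
      = keepPass (PySem.Set.ofList (PySem.List.pyRange ((PySem.List.max? g (fun v => altKey (PySem.Set.ofList g) v)).getD 0)
        (((PySem.List.max? g (fun v => altKey (PySem.Set.ofList g) v)).getD 0) + 5) 1)) g := by
  rw [← sel_eq g h]
  exact remove_eq _ g (by simpa using PySem.List.nodup_pyRange_one _ _)

theorem getMinCnt_eq_alt_aux (n : Nat) :
    ∀ (g : List Int) (cnt : Int), g.length ≤ n → getMinCnt g cnt = getMinCnt_alt g cnt := by
  induction n with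
  | zero =>
    intro g cnt hg
    have hnil : g = [] := List.length_eq_zero_iff.mp (Nat.le_zero.mp hg)
    subst hnil
    rw [getMinCnt, getMinCnt_alt]
    simp
  | succ n ih =>
    intro g cnt hg
    by_cases h : g = []
    · subst h
      rw [getMinCnt, getMinCnt_alt]
      simp
    · rw [getMinCnt, getMinCnt_alt]
      rw [if_neg (by simpa [List.length_eq_zero_iff] using h), dif_neg h]
      show getMinCnt (removePass (PySem.List.pyRange (PySem.List.pyGetD g (getOptimalIndex g) 0)
            (PySem.List.pyGetD g (getOptimalIndex g) 0 + 5) 1) g) (cnt + 1)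
          = getMinCnt_alt (keepPass (PySem.Set.ofList (PySem.List.pyRange
              ((PySem.List.max? g (fun v => altKey (PySem.Set.ofList g) v)).getD 0)
              (((PySem.List.max? g (fun v => altKey (PySem.Set.ofList g) v)).getD 0) + 5) 1)) g) (cnt + 1)
      rw [step_eq g h]
      apply ih
      have := alt_decr g h
      omega

theorem getMinCnt_eq_alt (g : List Int) (cnt : Int) : getMinCnt g cnt = getMinCnt_alt g cnt :=
  getMinCnt_eq_alt_aux g.length g cnt (le_refl _)

-- ===== VERDICT (by name: the statement is the Claim_ definition above) =====
theorem getMinCnt_spec : Claim_equal_getMinCnt := by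
  intro g cnt _
  unfold Spec_getMinCnt
  exact getMinCnt_eq_alt g cnt
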